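-- pv_equiv track=rewrite | github.com/clemsytoff/spe-nsijbs | recursivité.py | min_tab
-- ===== SOURCE A (Python) =====
-- def min_tab(T,index_debut,index_fin):
--
--     if index_debut > index_fin :
--         return T[index_fin]
--
--     mini = min_tab(T,index_debut+1,index_fin)
--     if mini < T[index_debut]:
--         return mini
--     else:
--         return T[index_debut]
-- ===== SOURCE B (Python) =====
-- def min_tab(T, index_debut, index_fin):
--     if index_debut > index_fin:
--         return T[index_fin]
--     mini = T[index_debut]
--     for i in range(index_debut + 1, index_fin + 1):
--         if T[i] < mini:
--             mini = T[i]
--     return mini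
-- ===== Notes on version B (the rewrite author's own statement) =====
-- stated objective: simpler
-- what changed: Replaces the right-to-left recursion with a single left-to-right loop keeping the running minimum (strict < preserves the leftmost minimum), avoiding recursion depth and call overhead.
import Mathlib
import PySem

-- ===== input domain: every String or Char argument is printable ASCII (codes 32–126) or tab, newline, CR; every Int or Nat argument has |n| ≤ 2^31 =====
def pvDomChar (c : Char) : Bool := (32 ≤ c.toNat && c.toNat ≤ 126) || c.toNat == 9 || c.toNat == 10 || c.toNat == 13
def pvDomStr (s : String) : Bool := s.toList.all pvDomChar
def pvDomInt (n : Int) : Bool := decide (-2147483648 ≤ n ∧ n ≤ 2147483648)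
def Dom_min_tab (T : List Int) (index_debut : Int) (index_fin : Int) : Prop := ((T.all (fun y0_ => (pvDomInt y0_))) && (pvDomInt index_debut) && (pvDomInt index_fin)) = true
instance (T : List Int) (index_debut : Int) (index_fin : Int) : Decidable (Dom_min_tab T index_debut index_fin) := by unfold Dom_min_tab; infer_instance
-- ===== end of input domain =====

-- B replaces A's right-to-left recursion by a single left-to-right loop with a running minimum
-- (strict < keeps the leftmost minimum): simpler, no recursion.

-- ===== PORT A =====
def min_tab (T : List Int) (index_debut : Int) (index_fin : Int) : Int :=
  if index_debut > index_fin then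
    (PySem.List.pyGet? T index_fin).getD 0   -- Pre_ guarantees the index is in range
  else
    let mini := min_tab T (index_debut + 1) index_fin
    let td := (PySem.List.pyGet? T index_debut).getD 0
    if mini < td then mini else td
termination_by (index_fin + 1 - index_debut).toNat
decreasing_by omega

-- ===== PORT B =====
def min_tab_alt (T : List Int) (index_debut : Int) (index_fin : Int) : Int :=
  if index_debut > index_fin then
    (PySem.List.pyGet? T index_fin).getD 0   -- Pre_ guarantees the index is in range
  else
    (PySem.List.pyRange (index_debut + 1) (index_fin + 1) 1).foldl
      (fun mini i =>
        let ti := (PySem.List.pyGet? T i).getD 0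
        if ti < mini then ti else mini)
      ((PySem.List.pyGet? T index_debut).getD 0)

-- ===== PRECONDITION & SPEC =====
-- Pre_ excludes exactly the inputs where Python A raises IndexError: the accessed
-- indices (index_fin if index_debut > index_fin, else the whole interval [index_debut, index_fin],
-- i.e. its two endpoints) must be in range.
def Pre_min_tab (T : List Int) (index_debut : Int) (index_fin : Int) : Prop :=
  if index_debut > index_fin then PySem.Raise.InRange T.length index_fin
  else PySem.Raise.InRange T.length index_debut ∧ PySem.Raise.InRange T.length index_fin
instance (T : List Int) (index_debut : Int) (index_fin : Int) : Decidable (Pre_min_tab T index_debut index_fin) := by unfold Pre_min_tab; infer_instance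

def pvWitness_min_tab : List Int × Int × Int := ([3, 1, 2, 1], 0, 3)

def Spec_min_tab (T : List Int) (index_debut : Int) (index_fin : Int) (out : Int) : Prop := out = min_tab_alt T index_debut index_fin
instance (T : List Int) (index_debut : Int) (index_fin : Int) (out : Int) : Decidable (Spec_min_tab T index_debut index_fin out) := by unfold Spec_min_tab; infer_instance

-- ===== CLAIM (what is proved, stated in full; the proofs are below) =====
def Claim_equal_min_tab : Prop := ∀ (T : List Int) (index_debut : Int) (index_fin : Int), Dom_min_tab T index_debut index_fin → Pre_min_tab T index_debut index_fin → Spec_min_tab T index_debut index_fin (min_tab T index_debut index_fin)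

-- ===== LEMMAS AND PROOFS =====

-- A's step is the binary min (ties go to the left argument T[d]).
theorem min_tab_unfold_le (T : List Int) (d f : Int) (h : d ≤ f) :
    min_tab T d f = min ((PySem.List.pyGet? T d).getD 0) (min_tab T (d + 1) f) := by
  rw [min_tab]
  simp only [if_neg (by omega : ¬ d > f)]
  simp only [min_def]; split_ifs <;> omega

theorem min_tab_base (T : List Int) (d f : Int) (h : d > f) :
    min_tab T d f = (PySem.List.pyGet? T f).getD 0 := by
  rw [min_tab]; simp [h]

-- The left fold of B over [d, f] with accumulator m computes min m (min_tab T d f).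
theorem foldl_min_eq (T : List Int) (f : Int) :
    ∀ (n : Nat) (d : Int), d ≤ f → (f + 1 - d).toNat = n → ∀ (m : Int),
      (PySem.List.pyRange d (f + 1) 1).foldl
        (fun mini i =>
          let ti := (PySem.List.pyGet? T i).getD 0
          if ti < mini then ti else mini) m
      = min m (min_tab T d f) := by
  intro n
  induction n with
  | zero => intro d hdf hn; omega
  | succ k ih =>
    intro d hdf hn m
    rw [PySem.List.pyRange_one_cons (by omega : d < f + 1)]
    simp only [List.foldl_cons]
    have hstep : (let ti := (PySem.List.pyGet? T d).getD 0;
        if ti < m then ti else m) = min m ((PySem.List.pyGet? T d).getD 0) := by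
      simp only [min_def]; split_ifs <;> omega
    rw [hstep]
    by_cases hdf2 : d + 1 ≤ f
    · rw [ih (d + 1) hdf2 (by omega)]
      rw [min_tab_unfold_le T d f hdf, min_assoc]
    · -- d = f : the remaining range is empty
      have hd : d = f := by omega
      rw [PySem.List.pyRange_one_eq_nil (by omega : f + 1 ≤ d + 1)]
      simp only [List.foldl_nil]
      rw [min_tab_unfold_le T d f hdf, min_tab_base T (d + 1) f (by omega), hd]
      simp

-- ===== VERDICT (by name: the statement is the Claim_ definition above) =====
theorem min_tab_spec : Claim_equal_min_tab := by
  intro T d f _ _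
  unfold Spec_min_tab min_tab_alt
  by_cases h : d > f
  · rw [min_tab_base T d f h, if_pos h]
  · rw [if_neg h]
    by_cases h2 : d + 1 ≤ f
    · rw [foldl_min_eq T f (f + 1 - (d + 1)).toNat (d + 1) h2 rfl]
      rw [min_tab_unfold_le T d f (by omega)]
    · -- d = f : empty loop, both sides are T[d]
      have hd : d = f := by omega
      rw [PySem.List.pyRange_one_eq_nil (by omega : f + 1 ≤ d + 1)]
      simp only [List.foldl_nil]
      rw [min_tab_unfold_le T d f (by omega), min_tab_base T (d + 1) f (by omega), hd]
      simp
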